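-- pv_equiv track=rewrite | github.com/ybear90/2019_WinterCoding | Programmers_practice/BinarySearch/question1.py | solution
-- ===== SOURCE A (Python) =====
-- def solution(budgets, M):
--     if sum(budgets) <= M:
--         return max(budgets)
--
--     left = 0
--     right = M  # 가능한 최대 예산 한계치
--     max_budget_total = 0  # 가능한 지방 예상 총합(최대 갱신)
--     max_upper_budget = 0  # 구하고자 하는 지방 예산 상한액
--
--     while left < right:
--         # 경계 내에서 계산한 예산 총액
--         mid = int((left + right) / 2)
--         bound_total = sum(min(mid, budget) for budget in budgets)
--
--         if bound_total > M:
--             right = mid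
--         else:
--             if max_budget_total < bound_total:
--                 max_budget_total, max_upper_budget = bound_total, mid
--             # 상한보다 못미칠 때는 사용했던 mid 보다 최소 1 커야 한다.
--             left = mid + 1
--
--     return min(max(budgets), max_upper_budget)
-- ===== SOURCE B (Python) =====
-- def solution(budgets, M):
--     total = sum(budgets)
--     mx = max(budgets)
--     if total <= M:
--         return mx
--     if M <= 0:
--         return 0
--     rest = M
--     cnt = len(budgets)
--     for b in sorted(budgets):
--         if b * cnt >= rest:
--             return min(mx, rest // cnt)
--         rest -= b
--         cnt -= 1
--     return 0  # unreachable: total > M means the loop always returns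
-- ===== Notes on version B (the rewrite author's own statement) =====
-- stated objective: alternative
-- what changed: B replaces A's binary search over the cap range [0, M) (each probe a full capped-sum pass over the list) by one sort of the budgets followed by a single scan that locates the segment containing the optimal cap and computes it by one division; B also considers cap M itself, fixing A's off-by-one.
-- intended difference: When the capped total already fits at cap M itself (sum(min(M,b)) <= M < sum(budgets), M >= 1), A's binary search uses the exclusive upper bound right = M and returns M-1, one below the optimum; B returns M, the intended largest cap whose capped total fits within M. — e.g. on solution([3], 1): A returns 0, B returns 1
-- outside the precondition, e.g. on solution([], 5): A raises ValueError, B raises ValueError; on solution([-10, 20], 3): A returns 0, B returns 13; on solution([-5], -100): A returns -5, B returns 0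
import Mathlib
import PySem

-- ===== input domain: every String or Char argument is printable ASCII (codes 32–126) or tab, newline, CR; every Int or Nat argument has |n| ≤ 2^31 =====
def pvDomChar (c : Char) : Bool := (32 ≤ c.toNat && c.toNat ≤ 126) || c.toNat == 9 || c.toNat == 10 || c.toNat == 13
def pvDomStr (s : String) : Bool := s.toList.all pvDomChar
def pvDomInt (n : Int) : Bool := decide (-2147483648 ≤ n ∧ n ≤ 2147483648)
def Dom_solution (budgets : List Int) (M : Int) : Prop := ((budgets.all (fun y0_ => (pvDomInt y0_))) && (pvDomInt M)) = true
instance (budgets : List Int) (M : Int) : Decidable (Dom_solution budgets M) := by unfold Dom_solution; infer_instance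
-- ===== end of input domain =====

-- B replaces A's binary search over the answer range [0, M) (a full capped-sum pass per probe)
-- by one sort of the budgets followed by a single scan; B also searches up to cap M inclusive,
-- fixing A's off-by-one (see D_solution below).

-- ===== PORT A =====
-- bound_total = sum(min(mid, budget) for budget in budgets)
def pyBoundTotal (budgets : List Int) (mid : Int) : Int :=
  budgets.foldl (fun acc b => acc + min mid b) 0

-- A's while loop.  The fuel only bounds the iteration count: the interval [left, right)
-- has length at most M.toNat at entry and shrinks at every step, so the loop always exits
-- via left = right before the fuel runs out (proved in loopA_char below).
-- Python's mid = int((left+right)/2) truncates toward zero; here left, right ≥ 0 throughout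
-- (left starts at 0 and never decreases), where truncation coincides with floor division.
def loopA (budgets : List Int) (M : Int) : Nat → Int → Int → Int → Int → Int
  | 0, _, _, _, maxUpper => maxUpper
  | fuel+1, left, right, maxTotal, maxUpper =>
    if left < right then
      let mid := PySem.Int.floordiv (left + right) 2
      let boundTotal := pyBoundTotal budgets mid
      if boundTotal > M then
        loopA budgets M fuel left mid maxTotal maxUpper
      else if maxTotal < boundTotal then
        loopA budgets M fuel (mid+1) right boundTotal mid
      else
        loopA budgets M fuel (mid+1) right maxTotal maxUpper
    else maxUpper

-- max(budgets) raises ValueError on []; that input is outside Pre_solution (getD 0 is junk there)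
def solution (budgets : List Int) (M : Int) : Int :=
  if budgets.foldl (· + ·) 0 ≤ M then
    (PySem.List.max? budgets (fun x => x)).getD 0
  else
    min ((PySem.List.max? budgets (fun x => x)).getD 0) (loopA budgets M M.toNat 0 M 0 0)

-- ===== PORT B =====
-- the for-loop of Source B: first b (ascending) with b*cnt >= rest fixes the cap rest // cnt
def scanB (mx : Int) : List Int → Int → Int → Int
  | [], _, _ => 0  -- unreachable when total > M: the loop always returns
  | b :: bs, rest, cnt =>
    if b * cnt ≥ rest then min mx (PySem.Int.floordiv rest cnt)
    else scanB mx bs (rest - b) (cnt - 1)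

def solution_alt (budgets : List Int) (M : Int) : Int :=
  let total := budgets.foldl (· + ·) 0
  let mx := (PySem.List.max? budgets (fun x => x)).getD 0
  if total ≤ M then mx
  else if M ≤ 0 then 0
  else scanB mx (PySem.List.sorted budgets (fun x => x) false) M (budgets.length : Int)

-- ===== PRECONDITION & SPEC =====
-- Pre_ excludes the empty list, on which A raises ValueError (max of an empty sequence), and
-- inputs with negative entries on which A's binary-search loop actually runs (or, for M ≤ 0,
-- all-negative lists) — outside the natural domain of budget requests — where A's
-- max_budget_total guard (initialised to 0) can skip recording a valid cap, or the final
-- min(max(budgets), 0) clamp leaks a negative maximum, and A's value is an accident of the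
-- implementation.
def Pre_solution (budgets : List Int) (M : Int) : Prop :=
  budgets ≠ [] ∧
    ((∀ b ∈ budgets, 0 ≤ b) ∨ budgets.foldl (· + ·) 0 ≤ M ∨
      (M ≤ 0 ∧ ∃ b ∈ budgets, 0 ≤ b))
instance (budgets : List Int) (M : Int) : Decidable (Pre_solution budgets M) := by
  unfold Pre_solution; infer_instance

def pvWitness_solution : List Int × Int := ([1, 2], 10)

-- When the capped total already fits at cap M itself (sum min(M,b) ≤ M < sum, M ≥ 1), A's
-- binary search stops at right = M and returns M-1, one below the optimum; B returns M, the
-- intended largest cap whose capped total fits in the budget M.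
def D_solution (budgets : List Int) (M : Int) : Prop :=
  1 ≤ M ∧ M < budgets.foldl (· + ·) 0 ∧ (budgets.map (fun b => min M b)).sum ≤ M
instance (budgets : List Int) (M : Int) : Decidable (D_solution budgets M) := by
  unfold D_solution; infer_instance

def Spec_solution (budgets : List Int) (M : Int) (out : Int) : Prop :=
  ¬ D_solution budgets M → out = solution_alt budgets M
instance (budgets : List Int) (M : Int) (out : Int) : Decidable (Spec_solution budgets M out) := by
  unfold Spec_solution; infer_instance

def pvDiffWitness_solution : List Int × Int := ([3], 1)
def pvDiffWitnessOut_solution : Int × Int := (0, 1)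

-- ===== CLAIM (what is proved, stated in full; the proofs are below) =====
def Claim_unchanged_solution : Prop := ∀ (budgets : List Int) (M : Int), Dom_solution budgets M → Pre_solution budgets M → Spec_solution budgets M (solution budgets M)
def Claim_changed_solution : Prop := Dom_solution (pvDiffWitness_solution.1) (pvDiffWitness_solution.2) ∧ Pre_solution (pvDiffWitness_solution.1) (pvDiffWitness_solution.2) ∧ D_solution (pvDiffWitness_solution.1) (pvDiffWitness_solution.2) ∧ solution (pvDiffWitness_solution.1) (pvDiffWitness_solution.2) = pvDiffWitnessOut_solution.1 ∧ solution_alt (pvDiffWitness_solution.1) (pvDiffWitness_solution.2) = pvDiffWitnessOut_solution.2 ∧ pvDiffWitnessOut_solution.1 ≠ pvDiffWitnessOut_solution.2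
def Claim_exact_solution : Prop := ∀ (budgets : List Int) (M : Int), Dom_solution budgets M → Pre_solution budgets M → D_solution budgets M → solution budgets M ≠ solution_alt budgets M

-- ===== LEMMAS AND PROOFS =====

-- Python's sum(l) as the fold A and B write, as List.sum
lemma foldl_sum_eq (u : List Int) : u.foldl (· + ·) 0 = u.sum := (List.sum_eq_foldl).symm

lemma foldl_sum_cons (b : Int) (bs : List Int) :
    (b :: bs).foldl (· + ·) 0 = b + bs.foldl (· + ·) 0 := by
  rw [foldl_sum_eq, foldl_sum_eq, List.sum_cons]

lemma foldl_sum_perm {u v : List Int} (h : u.Perm v) :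
    u.foldl (· + ·) 0 = v.foldl (· + ·) 0 := by
  rw [foldl_sum_eq, foldl_sum_eq]; exact h.sum_eq

-- f(c) := pyBoundTotal l c, the capped total, as a map-sum
lemma pyBT_eq_sum (l : List Int) (c : Int) :
    pyBoundTotal l c = (l.map (fun b => min c b)).sum := by
  simpa using PySem.List.foldl_add l (fun b => min c b) 0

lemma pyBT_nil (c : Int) : pyBoundTotal [] c = 0 := rfl

lemma pyBT_cons (b : Int) (bs : List Int) (c : Int) :
    pyBoundTotal (b :: bs) c = min c b + pyBoundTotal bs c := by
  simp [pyBT_eq_sum]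

lemma pyBT_perm {l l' : List Int} (h : l.Perm l') (c : Int) :
    pyBoundTotal l c = pyBoundTotal l' c := by
  rw [pyBT_eq_sum, pyBT_eq_sum]
  exact (h.map _).sum_eq

-- monotone in the cap
lemma pyBT_mono (l : List Int) {c d : Int} (h : c ≤ d) :
    pyBoundTotal l c ≤ pyBoundTotal l d := by
  induction l with
  | nil => simp [pyBT_nil]
  | cons b bs ih =>
    rw [pyBT_cons, pyBT_cons]
    have : min c b ≤ min d b := by omega
    omega

-- strict step: one more unit of cap gains ≥ 1 while some budget is still above it
lemma pyBT_step (l : List Int) (c : Int) (h : ∃ b ∈ l, c + 1 ≤ b) :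
    pyBoundTotal l c + 1 ≤ pyBoundTotal l (c + 1) := by
  induction l with
  | nil => simp at h
  | cons b bs ih =>
    rw [pyBT_cons, pyBT_cons]
    rcases h with ⟨x, hx, hxc⟩
    rcases List.mem_cons.mp hx with rfl | hx
    · have := pyBT_mono bs (le_of_lt (lt_add_one c))
      have : min c x + 1 ≤ min (c+1) x := by omega
      omega
    · have h1 := ih ⟨x, hx, hxc⟩
      have : min c b ≤ min (c+1) b := by omega
      omega

-- all budgets at least the cap: capped total is cap times the count
lemma pyBT_const_below (l : List Int) (c : Int) (h : ∀ x ∈ l, c ≤ x) :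
    pyBoundTotal l c = c * l.length := by
  induction l with
  | nil => simp [pyBT_nil]
  | cons b bs ih =>
    rw [pyBT_cons, ih (fun x hx => h x (List.mem_cons_of_mem _ hx))]
    have : min c b = c := by have := h b (List.mem_cons_self); omega
    rw [this]; simp [List.length_cons]; push_cast; ring

-- all budgets at most the cap: capped total is the plain sum
lemma pyBT_const_above (l : List Int) (c : Int) (h : ∀ x ∈ l, x ≤ c) :
    pyBoundTotal l c = l.foldl (· + ·) 0 := by
  induction l with
  | nil => rfl
  | cons b bs ih =>
    rw [pyBT_cons, ih (fun x hx => h x (List.mem_cons_of_mem _ hx)), foldl_sum_cons]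
    have : min c b = b := by have := h b (List.mem_cons_self); omega
    omega

lemma pyBT_zero (l : List Int) (h : ∀ x ∈ l, 0 ≤ x) : pyBoundTotal l 0 = 0 := by
  rw [pyBT_const_below l 0 h]; ring

-- caps are nonnegative termwise on nonnegative budgets
lemma pyBT_nonneg (l : List Int) {c : Int} (hnn : ∀ x ∈ l, 0 ≤ x) (hc : 0 ≤ c) :
    0 ≤ pyBoundTotal l c := by
  induction l with
  | nil => simp [pyBT_nil]
  | cons b bs ih =>
    rw [pyBT_cons]
    have hb := hnn b List.mem_cons_self
    have := ih (fun x hx => hnn x (List.mem_cons_of_mem _ hx))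
    omega

-- the max element alone gives f(c) ≥ c when c is between 0 and the max
lemma pyBT_ge_min (l : List Int) {mx c : Int} (hmem : mx ∈ l) (hnn : ∀ x ∈ l, 0 ≤ x)
    (hc : 0 ≤ c) (hcm : c ≤ mx) : c ≤ pyBoundTotal l c := by
  induction l with
  | nil => simp at hmem
  | cons b bs ih =>
    rw [pyBT_cons]
    have hrest : ∀ x ∈ bs, 0 ≤ x := fun x hx => hnn x (List.mem_cons_of_mem _ hx)
    rcases List.mem_cons.mp hmem with rfl | hmx
    · have := pyBT_nonneg bs hrest hc
      omega
    · have h1 := ih hmx hrest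
      have hb := hnn b List.mem_cons_self
      omega

-- below the maximum the capped total stays strictly below the full sum
lemma pyBT_lt_max (l : List Int) {mx c M : Int} (hmem : mx ∈ l) (hmax : ∀ x ∈ l, x ≤ mx)
    (hle : pyBoundTotal l c ≤ M) (hsum : M < l.foldl (· + ·) 0) : c < mx := by
  by_contra h
  push_neg at h
  have := pyBT_mono l h
  rw [pyBT_const_above l mx hmax] at this
  omega

-- ---- characterisation of A's loop ----
lemma loopA_char (l : List Int) (M mx : Int)
    (hmem : mx ∈ l) (hmax : ∀ b ∈ l, b ≤ mx) (hnn : ∀ b ∈ l, 0 ≤ b)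
    (hsum : M < l.foldl (· + ·) 0) (hM : 1 ≤ M) :
    ∀ (n : Nat) (left right maxTotal maxUpper : Int),
      (right - left).toNat ≤ n →
      0 ≤ left → left ≤ right → right ≤ M →
      (right = M ∨ M < pyBoundTotal l right) →
      ((left = 0 ∧ maxTotal = 0 ∧ maxUpper = 0) ∨
        (1 ≤ left ∧ maxTotal = pyBoundTotal l (left-1) ∧ maxUpper = left-1 ∧
          pyBoundTotal l (left-1) ≤ M)) →
      ∃ L, loopA l M n left right maxTotal maxUpper = L - 1 ∧ 1 ≤ L ∧ L ≤ M ∧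
        pyBoundTotal l (L-1) ≤ M ∧ (L = M ∨ M < pyBoundTotal l L) := by
  intro n
  induction n with
  | zero =>
    intro left right maxTotal maxUpper hfuel h0 hlr hrM hright hinv
    have hEq : left = right := by omega
    have hL1 : 1 ≤ left := by
      by_contra hc
      push_neg at hc
      have hl0 : left = 0 := by omega
      subst hl0
      rcases hright with h | h
      · omega
      · rw [← hEq, pyBT_zero l hnn] at h; omega
    rcases hinv with ⟨h, _⟩ | ⟨_, _, hU, hle⟩
    · omega
    · refine ⟨left, ?_, hL1, by omega, hle, ?_⟩
      · simpa [loopA] using hU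
      · rw [hEq]; exact hright
  | succ n ih =>
    intro left right maxTotal maxUpper hfuel h0 hlr hrM hright hinv
    by_cases hcond : left < right
    · rw [loopA]
      simp only [hcond, if_true]
      set mid := PySem.Int.floordiv (left + right) 2 with hmid
      have hmb := PySem.Int.floordiv_two_mid_bounds (le_of_lt hcond)
      have hmidlt : mid < right := by
        rw [hmid, PySem.Int.floordiv_eq_ediv_of_pos (by omega : (0:Int) < 2)]
        omega
      have hmidge : left ≤ mid := hmb.1
      by_cases hbt : pyBoundTotal l mid > M
      · simp only [hbt, if_true]
        exact ih left mid maxTotal maxUpper (by omega) h0 hmidge (by omega)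
          (Or.inr hbt) hinv
      · push_neg at hbt
        simp only [show ¬ (pyBoundTotal l mid > M) by omega, if_false]
        have hmid0 : 0 ≤ mid := by omega
        by_cases hmid1 : 1 ≤ mid
        · -- the update always fires: maxTotal < f(mid)
          have hmlt : mid < mx := pyBT_lt_max l hmem hmax hbt hsum
          have hstep : maxTotal < pyBoundTotal l mid := by
            rcases hinv with ⟨_, hT, _⟩ | ⟨hl1, hT, _, _⟩
            · -- maxTotal = 0 < f(mid): f(0) + 1 ≤ f(1) ≤ f(mid)
              have h1 := pyBT_step l 0 ⟨mx, hmem, by omega⟩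
              have h2 := pyBT_mono l (show (0:Int)+1 ≤ mid by omega)
              rw [pyBT_zero l hnn] at h1
              omega
            · have h1 := pyBT_step l (left - 1) ⟨mx, hmem, by omega⟩
              have h2 := pyBT_mono l (show left - 1 + 1 ≤ mid by omega)
              omega
          rw [if_pos hstep]
          have hmm : mid + 1 - 1 = mid := by ring
          refine ih (mid+1) right (pyBoundTotal l mid) mid (by omega) (by omega)
            (by omega) hrM hright (Or.inr ⟨by omega, by rw [hmm], by omega, by rw [hmm]; exact hbt⟩)
        · -- mid = 0, hence left = 0 and maxTotal = 0 = f(0): the guard skips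
          have hmide : mid = 0 := by omega
          have hlefte : left = 0 := by omega
          have hf0 : pyBoundTotal l mid = 0 := by rw [hmide]; exact pyBT_zero l hnn
          rcases hinv with ⟨_, hT, hU⟩ | ⟨hl1, _, _, _⟩
          · subst hT; subst hU
            rw [if_neg (show ¬ ((0:Int) < pyBoundTotal l mid) by omega)]
            refine ih (mid+1) right 0 0 (by omega) (by omega) (by omega)
              hrM hright (Or.inr ⟨by omega, ?_, by omega, ?_⟩)
            · rw [show mid + 1 - 1 = mid from by ring, hf0]
            · rw [show mid + 1 - 1 = mid from by ring, hf0]; omega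
          · omega
    · -- left = right already: loop exits
      have hEq : left = right := by omega
      rw [loopA]
      simp only [hcond, if_false]
      have hL1 : 1 ≤ left := by
        by_contra hc
        push_neg at hc
        have hl0 : left = 0 := by omega
        subst hl0
        rcases hright with h | h
        · omega
        · rw [← hEq, pyBT_zero l hnn] at h; omega
      rcases hinv with ⟨h, _⟩ | ⟨_, _, hU, hle⟩
      · omega
      · refine ⟨left, hU, hL1, by omega, hle, ?_⟩
        rw [hEq]; exact hright

-- ---- characterisation of B's scan ----
lemma scanB_char (l : List Int) (M mx : Int) :
    ∀ (t : List Int) (lowb rest : Int),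
      t.Pairwise (· ≤ ·) →
      (∀ b ∈ t, lowb ≤ b) → 0 ≤ lowb →
      (∀ c, lowb ≤ c → pyBoundTotal l c = (M - rest) + pyBoundTotal t c) →
      lowb * t.length < rest →
      rest < t.foldl (· + ·) 0 →
      ∃ c, scanB mx t rest (t.length : Int) = min mx c ∧ lowb ≤ c ∧
        pyBoundTotal l c ≤ M ∧ M < pyBoundTotal l (c + 1) := by
  intro t
  induction t with
  | nil =>
    intro lowb rest _ _ _ _ hcnt hrest
    simp at hcnt hrest
    omega
  | cons b bs ih =>
    intro lowb rest hpw hge hlb hH hcnt hrest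
    have hlen1 : ((b :: bs).length : Int) = (bs.length : Int) + 1 := by
      push_cast [List.length_cons]; ring
    have hbslen : (0:Int) ≤ (bs.length : Int) := by positivity
    rw [hlen1] at hcnt ⊢
    rw [scanB]
    have hcntpos : (0:Int) < (bs.length : Int) + 1 := by omega
    have hbge : lowb ≤ b := hge b List.mem_cons_self
    have hbs_ge : ∀ x ∈ bs, b ≤ x := fun x hx => (List.pairwise_cons.mp hpw).1 x hx
    by_cases hhit : b * ((bs.length : Int) + 1) ≥ rest
    · rw [if_pos hhit,
        PySem.Int.floordiv_eq_ediv_of_pos hcntpos]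
      obtain ⟨c, hceq⟩ : ∃ c, rest / ((bs.length : Int) + 1) = c := ⟨_, rfl⟩
      rw [hceq]
      have hclow : lowb ≤ c := by
        have := (Int.le_ediv_iff_mul_le hcntpos).mpr (le_of_lt hcnt)
        omega
      have hcmul : c * ((bs.length : Int) + 1) ≤ rest :=
        (Int.le_ediv_iff_mul_le hcntpos).mp (le_of_eq hceq.symm)
      have hlt : rest < (c + 1) * ((bs.length : Int) + 1) :=
        (Int.ediv_lt_iff_lt_mul hcntpos).mp (by omega)
      have hc0 : 0 ≤ c := by omega
      have hcleb : c ≤ b := by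
        by_contra hcb
        push_neg at hcb
        have h1 : (b + 1) * ((bs.length : Int) + 1) ≤ c * ((bs.length : Int) + 1) :=
          mul_le_mul_of_nonneg_right (by omega) (by omega)
        have h2 : (b + 1) * ((bs.length : Int) + 1)
            = b * ((bs.length : Int) + 1) + ((bs.length : Int) + 1) := by ring
        linarith
      have hall_ge_c : ∀ x ∈ b :: bs, c ≤ x := by
        intro x hx
        rcases List.mem_cons.mp hx with rfl | hx
        · exact hcleb
        · exact le_trans hcleb (hbs_ge x hx)
      refine ⟨c, rfl, hclow, ?_, ?_⟩
      · rw [hH c hclow, pyBT_const_below _ _ hall_ge_c, hlen1]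
        linarith
      · rw [hH (c+1) (by omega)]
        by_cases hcb1 : c + 1 ≤ b
        · have hfc1 : pyBoundTotal (b :: bs) (c+1) = (c+1) * ((b :: bs).length : Int) := by
            apply pyBT_const_below
            intro x hx
            rcases List.mem_cons.mp hx with rfl | hx
            · exact hcb1
            · exact le_trans hcb1 (hbs_ge x hx)
          rw [hfc1, hlen1]
          linarith
        · -- c = b, and then rest = b * cnt exactly
          have hceqb : c = b := by omega
          have hall_ge_b : ∀ x ∈ b :: bs, b ≤ x := by
            intro x hx
            rcases List.mem_cons.mp hx with h | hx
            · exact le_of_eq h.symm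
            · exact hbs_ge x hx
          have hfb : pyBoundTotal (b :: bs) b = b * ((bs.length : Int) + 1) := by
            rw [pyBT_const_below _ _ hall_ge_b, hlen1]
          -- some element exceeds b, else the whole suffix sum equals rest
          have hex : ∃ x ∈ b :: bs, b + 1 ≤ x := by
            by_contra hne
            push_neg at hne
            have habove : pyBoundTotal (b :: bs) b = (b :: bs).foldl (· + ·) 0 := by
              apply pyBT_const_above
              intro x hx
              have := hne x hx; omega
            rw [hfb] at habove
            subst hceqb
            linarith
          have hstep := pyBT_step (b :: bs) b hex
          rw [show c + 1 = b + 1 from by omega]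
          subst hceqb
          linarith
    · rw [if_neg hhit]
      have hblt := lt_of_not_ge hhit
      rw [show (bs.length : Int) + 1 - 1 = (bs.length : Int) from by ring]
      have hH' : ∀ c, b ≤ c → pyBoundTotal l c = (M - (rest - b)) + pyBoundTotal bs c := by
        intro c hcb
        have h1 := hH c (by omega)
        rw [pyBT_cons] at h1
        have hmin : min c b = b := by omega
        rw [h1, hmin]; ring
      have hC : b * (bs.length : Int) < rest - b := by
        have e : b * ((bs.length : Int) + 1) = b * (bs.length : Int) + b := by ring
        linarith
      have hR : rest - b < bs.foldl (· + ·) 0 := by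
        have hsc := foldl_sum_cons b bs
        linarith
      obtain ⟨c, hc1, hc2, hc3, hc4⟩ :=
        ih b (rest - b) (List.pairwise_cons.mp hpw).2 hbs_ge (by omega) hH' hC hR
      exact ⟨c, hc1, le_trans hbge hc2, hc3, hc4⟩

-- threshold caps are unique
lemma threshold_unique (l : List Int) (M a b : Int)
    (ha1 : pyBoundTotal l a ≤ M) (ha2 : M < pyBoundTotal l (a+1))
    (hb1 : pyBoundTotal l b ≤ M) (hb2 : M < pyBoundTotal l (b+1)) : a = b := by
  by_contra h
  rcases lt_or_gt_of_ne h with hlt | hlt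
  · have := pyBT_mono l (show a + 1 ≤ b by omega); omega
  · have := pyBT_mono l (show b + 1 ≤ a by omega); omega

-- facts extracted once from Pre_
lemma max_facts (budgets : List Int) (hne : budgets ≠ []) :
    ∃ mx, PySem.List.max? budgets (fun x => x) = some mx ∧ mx ∈ budgets ∧
      ∀ b ∈ budgets, b ≤ mx := by
  cases h : PySem.List.max? budgets (fun x => x) with
  | none => exact absurd ((PySem.List.max?_eq_none_iff budgets _).mp h) hne
  | some mx =>
    exact ⟨mx, rfl, PySem.List.max?_mem h, fun b hb => PySem.List.max?_isMax h b hb⟩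

-- the two programs agree whenever the search never has to look at cap M itself
lemma main_agree (budgets : List Int) (M : Int)
    (hne : budgets ≠ []) (hnn : ∀ b ∈ budgets, 0 ≤ b)
    (hnd : ¬ D_solution budgets M) :
    solution budgets M = solution_alt budgets M := by
  obtain ⟨mx, hmx, hmem, hmax⟩ := max_facts budgets hne
  have hmx0 : 0 ≤ mx := hnn mx hmem
  rw [solution, solution_alt]
  simp only [hmx, Option.getD_some]
  by_cases hsum : budgets.foldl (· + ·) 0 ≤ M
  · simp only [hsum, if_true]
  · simp only [hsum, if_false]
    push_neg at hsum
    by_cases hM : M ≤ 0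
    · -- the loop body never runs (fuel M.toNat = 0 and left = right anyway)
      have : M.toNat = 0 := by omega
      rw [this]
      simp only [loopA, if_true]
      omega
    · push_neg at hM
      simp only [show ¬ M ≤ 0 by omega, if_false]
      have hM1 : (1:Int) ≤ M := by omega
      -- A's loop
      obtain ⟨L, hAeq, hL1, hLM, hfL1, hfL⟩ :=
        loopA_char budgets M mx hmem hmax hnn hsum hM1 M.toNat 0 M 0 0
          (by omega) (by omega) (by omega) (by omega) (Or.inl rfl)
          (Or.inl ⟨rfl, rfl, rfl⟩)
      -- outside D, f(M) > M
      have hfM : M < pyBoundTotal budgets M := by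
        rw [D_solution] at hnd
        push_neg at hnd
        have := hnd hM1 hsum
        rw [pyBT_eq_sum]
        omega
      have hfL' : M < pyBoundTotal budgets L := by
        rcases hfL with rfl | h
        · exact hfM
        · exact h
      -- B's scan
      have hperm := PySem.List.sorted_perm budgets (fun x => x) false
      obtain ⟨c, hBeq, hclow, hfc, hfc1⟩ :=
        scanB_char budgets M mx (PySem.List.sorted budgets (fun x => x) false) 0 M
          (by simpa using PySem.List.sorted_pairwise budgets (fun x => x))
          (fun b hb => hnn b ((PySem.List.mem_sorted budgets _ false b).mp hb))
          (le_refl 0)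
          (fun c _ => by rw [pyBT_perm hperm c]; ring)
          (by simpa using hM)
          (by
            have := foldl_sum_perm hperm
            omega)
      rw [hperm.length_eq] at hBeq
      rw [hAeq, hBeq]
      have : L - 1 = c :=
        threshold_unique budgets M (L-1) c hfL1 (by rw [show L - 1 + 1 = L from by ring]; exact hfL') hfc hfc1
      rw [this]

-- inside D, A returns M - 1 and B returns M
lemma main_differ (budgets : List Int) (M : Int)
    (hne : budgets ≠ []) (hnn : ∀ b ∈ budgets, 0 ≤ b)
    (hd : D_solution budgets M) :
    solution budgets M = M - 1 ∧ solution_alt budgets M = M := by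
  obtain ⟨hM1, hsum, hfM'⟩ := hd
  have hfM : pyBoundTotal budgets M ≤ M := by rw [pyBT_eq_sum]; exact hfM'
  obtain ⟨mx, hmx, hmem, hmax⟩ := max_facts budgets hne
  have hmxM : M < mx := pyBT_lt_max budgets hmem hmax hfM hsum
  rw [solution, solution_alt]
  simp only [hmx, Option.getD_some]
  simp only [show ¬ budgets.foldl (· + ·) 0 ≤ M by omega, if_false,
    show ¬ M ≤ 0 by omega, if_false]
  constructor
  · -- A: the loop ends with L = M
    obtain ⟨L, hAeq, hL1, hLM, hfL1, hfL⟩ :=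
      loopA_char budgets M mx hmem hmax hnn hsum hM1 M.toNat 0 M 0 0
        (by omega) (by omega) (by omega) (by omega) (Or.inl rfl)
        (Or.inl ⟨rfl, rfl, rfl⟩)
    have hLeq : L = M := by
      rcases hfL with h | h
      · exact h
      · have := pyBT_mono budgets hLM; omega
    rw [hAeq, hLeq]
    omega
  · -- B: the scan finds c = M
    have hperm := PySem.List.sorted_perm budgets (fun x => x) false
    obtain ⟨c, hBeq, hclow, hfc, hfc1⟩ :=
      scanB_char budgets M mx (PySem.List.sorted budgets (fun x => x) false) 0 M
        (by simpa using PySem.List.sorted_pairwise budgets (fun x => x))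
        (fun b hb => hnn b ((PySem.List.mem_sorted budgets _ false b).mp hb))
        (le_refl 0)
        (fun c _ => by rw [pyBT_perm hperm c]; ring)
        (by simpa using hM1)
        (by
          have := foldl_sum_perm hperm
          omega)
    rw [hperm.length_eq] at hBeq
    have hceq : c = M := by
      by_contra hc
      rcases lt_or_gt_of_ne hc with hlt | hlt
      · have := pyBT_mono budgets (show c + 1 ≤ M by omega); omega
      · have h1 := pyBT_mono budgets (show M + 1 ≤ c by omega)
        have h2 := pyBT_step budgets M ⟨mx, hmem, by omega⟩
        have h3 := pyBT_ge_min budgets hmem hnn (c := M) (by omega) (by omega)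
        omega
    rw [hBeq, hceq]
    omega

-- ===== VERDICT (by name: the statement is the Claim_ definition above) =====
theorem solution_spec : Claim_unchanged_solution := by
  intro budgets M _ hpre hnd
  obtain ⟨hne, hdisj⟩ := hpre
  rcases hdisj with hnn | hsum | ⟨hM0, bb, hbb, hbb0⟩
  · exact main_agree budgets M hne hnn hnd
  · rw [solution, solution_alt]
    simp only [if_pos hsum]
  · by_cases hsum : budgets.foldl (· + ·) 0 ≤ M
    · rw [solution, solution_alt]
      simp only [if_pos hsum]
    · obtain ⟨mx, hmx, hmem, hmax⟩ := max_facts budgets hne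
      have hmx0 : 0 ≤ mx := le_trans hbb0 (hmax bb hbb)
      rw [solution, solution_alt]
      simp only [hmx, Option.getD_some, if_neg hsum, if_pos hM0]
      have hfuel : M.toNat = 0 := by omega
      rw [hfuel]
      simp only [loopA]
      omega

theorem solution_changed : Claim_changed_solution := by
  unfold Claim_changed_solution; decide

theorem solution_tight : Claim_exact_solution := by
  intro budgets M _ hpre hd
  have hnn : ∀ b ∈ budgets, 0 ≤ b := by
    obtain ⟨hM1, hsum, _⟩ := hd
    rcases hpre.2 with h | h | h
    · exact h
    · omega
    · omega
  obtain ⟨hA, hB⟩ := main_differ budgets M hpre.1 hnn hd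
  rw [hA, hB]
  omega
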